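-- pv_equiv track=rewrite | github.com/lancekf/advent-of-code-2021-py | day3/part2.py | findBitSums
-- ===== SOURCE A (Python) =====
-- def findBitSums(list):
--     sums = []
--
--     for i in range(len(list[0])):
--         sums.append(0)
--
--     for num in list:
--         for i in range(len(num)):
--             b = -1 if num[i] == '0' else 1
--             sums[i] = sums[i] + b
--
--     return sums
-- ===== SOURCE B (Python) =====
-- def findBitSums(list):
--     cols = [[] for _ in range(len(list[0]))]
--     for num in list:
--         for i, c in enumerate(num):
--             cols[i].append(c)
--     return [len(col) - 2 * col.count('0') for col in cols]
-- ===== Notes on version B (the rewrite author's own statement) =====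
-- stated objective: alternative
-- what changed: B materializes the transpose — it scatters each character into a per-column bucket list — and then derives every output entry by the closed form len(col) - 2*col.count('0'), instead of A's arithmetic +1/-1 accumulation in place into the output array.
import Mathlib
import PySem

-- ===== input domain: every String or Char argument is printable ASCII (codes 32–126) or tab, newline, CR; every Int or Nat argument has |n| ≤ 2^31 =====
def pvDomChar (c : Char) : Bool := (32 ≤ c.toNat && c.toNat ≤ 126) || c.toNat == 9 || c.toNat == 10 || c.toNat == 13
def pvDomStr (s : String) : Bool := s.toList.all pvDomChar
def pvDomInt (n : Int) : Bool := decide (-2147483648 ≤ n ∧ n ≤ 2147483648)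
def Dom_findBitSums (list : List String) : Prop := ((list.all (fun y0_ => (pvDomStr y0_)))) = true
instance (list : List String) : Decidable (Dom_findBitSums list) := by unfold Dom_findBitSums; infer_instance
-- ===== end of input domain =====

-- B materializes the transpose (per-column character buckets) and derives each entry by the
-- closed form len(col) - 2*col.count('0'), instead of A's in-place +1/-1 accumulation (alternative).

-- ===== PORT A =====
-- A: sums = [0]*len(list[0]) built by an append loop; then for each num,
-- for i in range(len(num)): sums[i] += -1 if num[i] == '0' else 1.
-- range(len(..)) is ported as List.range (the indices are the naturals 0..len-1, exact).
def findBitSums (list : List String) : List Int :=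
  let sums : List Int :=
    (List.range (list.headI).toList.length).foldl (fun s _ => s ++ [(0 : Int)]) []
  -- on [] Python raises IndexError at list[0]; excluded by Pre_findBitSums
  list.foldl (fun sums num =>
    (List.range num.toList.length).foldl (fun s i =>
      let b : Int := if num.toList.getD i ' ' = '0' then -1 else 1
      s.set i (s.getD i 0 + b)) sums) sums

-- ===== PORT B =====
-- B: cols = [[] for _ in range(len(list[0]))]; for num in list: for i, c in enumerate(num):
-- cols[i].append(c); return [len(col) - 2*col.count('0') for col in cols].
-- cols[i] with i out of range is IndexError in Python (excluded by Pre_findBitSums);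
-- pySetD/pyGetD are exact on the in-range indices enumerate produces there.
def findBitSums_alt (list : List String) : List Int :=
  let cols0 : List (List Char) := (List.range (list.headI).toList.length).map (fun _ => [])
  let cols := list.foldl (fun cols num =>
    (PySem.List.enumerate num.toList).foldl (fun cols ic =>
      PySem.List.pySetD cols ic.1 (PySem.List.pyGetD cols ic.1 [] ++ [ic.2])) cols) cols0
  cols.map (fun col => (col.length : Int) - 2 * (col.count '0' : Int))

-- ===== PRECONDITION & SPEC =====
-- Pre_ excludes exactly the inputs on which the Python A (and B alike) raises IndexError:
-- the empty list (list[0]) and lists with a string longer than the first (index i out of range).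
def Pre_findBitSums (list : List String) : Prop :=
  list ≠ [] ∧ ∀ s ∈ list, s.toList.length ≤ (list.headI).toList.length
instance (list : List String) : Decidable (Pre_findBitSums list) := by
  unfold Pre_findBitSums; infer_instance
def pvWitness_findBitSums : List String := ["101", "010", "11"]

def Spec_findBitSums (list : List String) (out : List Int) : Prop := out = findBitSums_alt list
instance (list : List String) (out : List Int) : Decidable (Spec_findBitSums list out) := by
  unfold Spec_findBitSums; infer_instance

-- ===== CLAIM (what is proved, stated in full; the proofs are below) =====
def Claim_equal_findBitSums : Prop :=
  ∀ (list : List String), Dom_findBitSums list → Pre_findBitSums list →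
    Spec_findBitSums list (findBitSums list)

-- ===== LEMMAS AND PROOFS =====

def pvBit (c : Char) : Int := if c = '0' then -1 else 1

-- A's inner row loop: add pvBit of each char into its slot
def pvRow (r : List Char) (s : List Int) : List Int :=
  (List.range r.length).foldl (fun s i => s.set i (s.getD i 0 + pvBit (r.getD i ' '))) s

-- B's inner row loop: append each char to its column bucket
def pvCRow (r : List Char) (cs : List (List Char)) : List (List Char) :=
  (List.range r.length).foldl (fun cs i => cs.set i (cs.getD i [] ++ [r.getD i ' '])) cs

-- A's initializer loop builds a list of zeros.
theorem pvZeros (n : Nat) :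
    (List.range n).foldl (fun s _ => s ++ [(0 : Int)]) [] = List.replicate n 0 := by
  induction n with
  | zero => rfl
  | succ n ih => simp [List.range_succ, ih, List.replicate_succ']

theorem pvRowPartialLen (r : List Char) (n : Nat) (sums : List Int) :
    ((List.range n).foldl (fun s i => s.set i (s.getD i 0 + pvBit (r.getD i ' '))) sums).length
      = sums.length := by
  induction n with
  | zero => rfl
  | succ n ih =>
    rw [List.range_succ, List.foldl_append, List.foldl_cons, List.foldl_nil,
      List.length_set, ih]

theorem pvRowLen (r : List Char) (sums : List Int) :
    (pvRow r sums).length = sums.length := pvRowPartialLen r r.length sums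

-- pointwise effect of A's row loop (n ≤ sums.length: no out-of-range set)
theorem pvRowPartialGet (r : List Char) (sums : List Int) :
    ∀ (n : Nat), n ≤ sums.length → ∀ (j : Nat),
    ((List.range n).foldl (fun s i => s.set i (s.getD i 0 + pvBit (r.getD i ' '))) sums)[j]?
      = if j < n then some (sums.getD j 0 + pvBit (r.getD j ' ')) else sums[j]? := by
  intro n
  induction n with
  | zero => intro _ j; simp
  | succ n ih =>
    intro hn j
    have hn' : n ≤ sums.length := Nat.le_of_succ_le hn
    rw [List.range_succ, List.foldl_append, List.foldl_cons, List.foldl_nil]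
    have h1 := ih hn' n
    rw [if_neg (lt_irrefl n)] at h1
    have hgetn : ((List.range n).foldl
        (fun s i => s.set i (s.getD i 0 + pvBit (r.getD i ' '))) sums).getD n 0
        = sums.getD n 0 := by
      rw [List.getD_eq_getElem?_getD, h1, ← List.getD_eq_getElem?_getD]
    rw [hgetn, List.getElem?_set]
    have hlen := pvRowPartialLen r n sums
    by_cases hj : n = j
    · subst hj
      rw [if_pos rfl, hlen, if_pos (by omega), if_pos (by omega)]
    · rw [if_neg hj, ih hn' j]
      by_cases hjn : j < n
      · rw [if_pos hjn, if_pos (by omega)]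
      · rw [if_neg hjn, if_neg (by omega)]

theorem pvRowGet (r : List Char) (sums : List Int)
    (hr : r.length ≤ sums.length) (j : Nat) :
    (pvRow r sums)[j]?
      = if j < r.length then some (sums.getD j 0 + pvBit (r.getD j ' ')) else sums[j]? :=
  pvRowPartialGet r sums r.length hr j

-- the same two lemmas for B's bucket row loop
theorem pvCRowPartialLen (r : List Char) (n : Nat) (cs : List (List Char)) :
    ((List.range n).foldl (fun cs i => cs.set i (cs.getD i [] ++ [r.getD i ' '])) cs).length
      = cs.length := by
  induction n with
  | zero => rfl
  | succ n ih =>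
    rw [List.range_succ, List.foldl_append, List.foldl_cons, List.foldl_nil,
      List.length_set, ih]

theorem pvCRowLen (r : List Char) (cs : List (List Char)) :
    (pvCRow r cs).length = cs.length := pvCRowPartialLen r r.length cs

theorem pvCRowPartialGet (r : List Char) (cs : List (List Char)) :
    ∀ (n : Nat), n ≤ cs.length → ∀ (j : Nat),
    ((List.range n).foldl (fun cs i => cs.set i (cs.getD i [] ++ [r.getD i ' '])) cs)[j]?
      = if j < n then some (cs.getD j [] ++ [r.getD j ' ']) else cs[j]? := by
  intro n
  induction n with
  | zero => intro _ j; simp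
  | succ n ih =>
    intro hn j
    have hn' : n ≤ cs.length := Nat.le_of_succ_le hn
    rw [List.range_succ, List.foldl_append, List.foldl_cons, List.foldl_nil]
    have h1 := ih hn' n
    rw [if_neg (lt_irrefl n)] at h1
    have hgetn : ((List.range n).foldl
        (fun cs i => cs.set i (cs.getD i [] ++ [r.getD i ' '])) cs).getD n []
        = cs.getD n [] := by
      rw [List.getD_eq_getElem?_getD, h1, ← List.getD_eq_getElem?_getD]
    rw [hgetn, List.getElem?_set]
    have hlen := pvCRowPartialLen r n cs
    by_cases hj : n = j
    · subst hj
      rw [if_pos rfl, hlen, if_pos (by omega), if_pos (by omega)]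
    · rw [if_neg hj, ih hn' j]
      by_cases hjn : j < n
      · rw [if_pos hjn, if_pos (by omega)]
      · rw [if_neg hjn, if_neg (by omega)]

theorem pvCRowGet (r : List Char) (cs : List (List Char))
    (hr : r.length ≤ cs.length) (j : Nat) :
    (pvCRow r cs)[j]?
      = if j < r.length then some (cs.getD j [] ++ [r.getD j ' ']) else cs[j]? :=
  pvCRowPartialGet r cs r.length hr j

-- B's enumerate fold over a row IS the bucket row loop
theorem pvEnumRow (r : List Char) (cs : List (List Char)) :
    (PySem.List.enumerate r).foldl (fun cs ic =>
        PySem.List.pySetD cs ic.1 (PySem.List.pyGetD cs ic.1 [] ++ [ic.2])) cs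
      = pvCRow r cs := by
  rw [PySem.List.enumerate_eq_map_pyRange r ' ', List.foldl_map, PySem.List.pyRange_one,
    List.foldl_map]
  have hstep : (fun (cs : List (List Char)) (k : Nat) =>
      PySem.List.pySetD cs ((0 : Int) + (k : Int))
        (PySem.List.pyGetD cs ((0 : Int) + (k : Int)) []
          ++ [PySem.List.pyGetD r ((0 : Int) + (k : Int)) ' ']))
      = (fun (cs : List (List Char)) (k : Nat) =>
          cs.set k (cs.getD k [] ++ [r.getD k ' '])) := by
    funext cs k
    simp
  rw [hstep]
  have hlen : ((PySem.List.len r - 0).toNat) = r.length := by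
    simp [PySem.List.len_eq]
  rw [hlen]
  rfl

-- the per-column ±1 contribution of a list of rows at position j (A's column total)
def pvColSum (rows : List String) (j : Nat) : Int :=
  (rows.map (fun r => if j < r.toList.length then pvBit (r.toList.getD j ' ') else 0)).sum

theorem pvColSum_cons (r : String) (rows : List String) (j : Nat) :
    pvColSum (r :: rows) j
      = (if j < r.toList.length then pvBit (r.toList.getD j ' ') else 0) + pvColSum rows j := by
  simp [pvColSum]

-- the characters landing in bucket j (B's column)
def pvColChars (rows : List String) (j : Nat) : List Char :=
  rows.filterMap (fun s => if j < s.toList.length then some (s.toList.getD j ' ') else none)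

theorem pvColChars_cons (r : String) (rows : List String) (j : Nat) :
    pvColChars (r :: rows) j
      = (if j < r.toList.length then [r.toList.getD j ' '] else []) ++ pvColChars rows j := by
  simp only [pvColChars, List.filterMap_cons]
  by_cases hj : j < r.toList.length
  · rw [if_pos hj, if_pos hj]
    rfl
  · rw [if_neg hj, if_neg hj]
    rfl

-- A's outer loop over the rows adds pvColSum pointwise
theorem pvOuterGet (j : Nat) :
    ∀ (rows : List String) (sums : List Int),
    (∀ s ∈ rows, s.toList.length ≤ sums.length) →
    (rows.foldl (fun sums num => pvRow num.toList sums) sums)[j]?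
      = sums[j]?.map (fun v => v + pvColSum rows j) := by
  intro rows
  induction rows with
  | nil =>
    intro sums _
    simp [pvColSum]
  | cons r rows ih =>
    intro sums h
    have hr : r.toList.length ≤ sums.length := h r (by simp)
    have hlen := pvRowLen r.toList sums
    have h' : ∀ s ∈ rows, s.toList.length ≤ (pvRow r.toList sums).length := by
      intro s hs; rw [hlen]; exact h s (by simp [hs])
    simp only [List.foldl_cons]
    rw [ih _ h', pvRowGet r.toList sums hr j]
    by_cases hj : j < r.toList.length
    · have hjs : j < sums.length := by omega
      rw [if_pos hj, List.getElem?_eq_getElem hjs]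
      have hD : sums.getD j 0 = sums[j] := by
        rw [List.getD_eq_getElem?_getD, List.getElem?_eq_getElem hjs]; rfl
      simp only [Option.map_some]
      rw [pvColSum_cons, if_pos hj, hD, add_assoc]
    · rw [if_neg hj, pvColSum_cons, if_neg hj, zero_add]

-- B's outer loop over the rows appends pvColChars pointwise
theorem pvCOuterGet (j : Nat) :
    ∀ (rows : List String) (cs : List (List Char)),
    (∀ s ∈ rows, s.toList.length ≤ cs.length) →
    (rows.foldl (fun cs num => pvCRow num.toList cs) cs)[j]?
      = cs[j]?.map (fun v => v ++ pvColChars rows j) := by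
  intro rows
  induction rows with
  | nil =>
    intro cs _
    simp [pvColChars]
  | cons r rows ih =>
    intro cs h
    have hr : r.toList.length ≤ cs.length := h r (by simp)
    have hlen := pvCRowLen r.toList cs
    have h' : ∀ s ∈ rows, s.toList.length ≤ (pvCRow r.toList cs).length := by
      intro s hs; rw [hlen]; exact h s (by simp [hs])
    simp only [List.foldl_cons]
    rw [ih _ h', pvCRowGet r.toList cs hr j]
    by_cases hj : j < r.toList.length
    · have hjs : j < cs.length := by omega
      rw [if_pos hj, List.getElem?_eq_getElem hjs]
      have hD : cs.getD j [] = cs[j] := by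
        rw [List.getD_eq_getElem?_getD, List.getElem?_eq_getElem hjs]; rfl
      simp only [Option.map_some]
      rw [pvColChars_cons, if_pos hj, hD, List.append_assoc]
    · rw [if_neg hj, pvColChars_cons, if_neg hj, List.nil_append]

-- the ±1 column total is len(col) - 2·(number of '0's in col)
theorem pvColSumChars (j : Nat) : ∀ (rows : List String),
    pvColSum rows j
      = ((pvColChars rows j).length : Int) - 2 * ((pvColChars rows j).count '0' : Int) := by
  intro rows
  induction rows with
  | nil => simp [pvColSum, pvColChars]
  | cons r rs ih =>
    rw [pvColSum_cons, pvColChars_cons, ih]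
    by_cases hj : j < r.toList.length
    · rw [if_pos hj, if_pos hj, List.singleton_append, List.length_cons, List.count_cons]
      by_cases h0 : r.toList.getD j ' ' = '0'
      · rw [pvBit, if_pos h0, if_pos (by rw [h0]; rfl)]
        push_cast
        ring
      · rw [pvBit, if_neg h0, if_neg (fun hb => h0 (beq_iff_eq.mp hb))]
        push_cast
        ring
    · rw [if_neg hj, if_neg hj, List.nil_append, zero_add]

-- ===== VERDICT (by name: the statement is the Claim_ definition above) =====
theorem findBitSums_spec : Claim_equal_findBitSums := by
  intro list _hdom hpre
  obtain ⟨hne, hlenall⟩ := hpre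
  unfold Spec_findBitSums findBitSums findBitSums_alt
  dsimp only
  rw [pvZeros]
  have hbitA : (fun (sums : List Int) (num : String) =>
      (List.range num.toList.length).foldl
        (fun s i => s.set i (s.getD i 0 + if num.toList.getD i ' ' = '0' then -1 else 1)) sums)
      = (fun (sums : List Int) (num : String) => pvRow num.toList sums) := by
    funext sums num; simp [pvRow, pvBit]
  have henumB : (fun (cols : List (List Char)) (num : String) =>
      (PySem.List.enumerate num.toList).foldl (fun cols ic =>
        PySem.List.pySetD cols ic.1 (PySem.List.pyGetD cols ic.1 [] ++ [ic.2])) cols)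
      = (fun (cols : List (List Char)) (num : String) => pvCRow num.toList cols) := by
    funext cols num; exact pvEnumRow num.toList cols
  rw [hbitA, henumB]
  set w := (list.headI).toList.length with hw
  have hinit : (List.range w).map (fun _ => ([] : List Char)) = List.replicate w [] := by
    rw [List.map_const', List.length_range]
  rw [hinit]
  set z : List Int := List.replicate w 0 with hz
  set c0 : List (List Char) := List.replicate w ([] : List Char) with hc0
  have hsums : ∀ s ∈ list, s.toList.length ≤ z.length := by
    intro s hs; rw [hz, List.length_replicate]; exact hlenall s hs
  have hcs : ∀ s ∈ list, s.toList.length ≤ c0.length := by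
    intro s hs; rw [hc0, List.length_replicate]; exact hlenall s hs
  apply List.ext_getElem?
  intro j
  rw [pvOuterGet j list z hsums, List.getElem?_map, pvCOuterGet j list c0 hcs]
  by_cases hj : j < w
  · have hzj : z[j]? = some 0 := by
      rw [hz, List.getElem?_replicate, if_pos hj]
    have hcj : c0[j]? = some [] := by
      rw [hc0, List.getElem?_replicate, if_pos hj]
    rw [hzj, hcj]
    simp only [Option.map_some, List.nil_append, zero_add]
    rw [pvColSumChars j list]
  · have hzj : z[j]? = none := by
      rw [hz, List.getElem?_replicate, if_neg hj]
    have hcj : c0[j]? = none := by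
      rw [hc0, List.getElem?_replicate, if_neg hj]
    rw [hzj, hcj]
    rfl
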